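-- pv_equiv track=rewrite | github.com/RotorHazard/RotorHazard | src/helpers/mqtt_helper.py | make_topic
-- ===== SOURCE A (Python) =====
-- def make_topic(root, parts):
--     topic = root
--     if root and parts:
--         topic += '/'
--     topic += '/'.join([p.replace('%', '%25').
--                  replace('/', '%2F').
--                  replace('#', '%23').
--                  replace('+', '%2B') if not p in ['+', '#'] else p for p in parts])
--     return topic
-- ===== SOURCE B (Python) =====
-- def make_topic(root, parts):
--     buf = list(root)
--     sep = bool(root)
--     for p in parts:
--         if sep:
--             buf.append('/')
--         sep = True
--         if p == '+' or p == '#':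
--             buf.append(p)
--         else:
--             for c in p:
--                 if c == '%':
--                     buf.append('%25')
--                 elif c == '/':
--                     buf.append('%2F')
--                 elif c == '#':
--                     buf.append('%23')
--                 elif c == '+':
--                     buf.append('%2B')
--                 else:
--                     buf.append(c)
--     return ''.join(buf)
-- ===== Notes on version B (the rewrite author's own statement) =====
-- stated objective: alternative
-- what changed: B builds the whole topic in one fused accumulator loop emitting '/' separators and escape sequences character by character as it goes, instead of A's staged pipeline of four whole-string replace passes per part followed by a join and conditional concatenation.
import Mathlib
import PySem

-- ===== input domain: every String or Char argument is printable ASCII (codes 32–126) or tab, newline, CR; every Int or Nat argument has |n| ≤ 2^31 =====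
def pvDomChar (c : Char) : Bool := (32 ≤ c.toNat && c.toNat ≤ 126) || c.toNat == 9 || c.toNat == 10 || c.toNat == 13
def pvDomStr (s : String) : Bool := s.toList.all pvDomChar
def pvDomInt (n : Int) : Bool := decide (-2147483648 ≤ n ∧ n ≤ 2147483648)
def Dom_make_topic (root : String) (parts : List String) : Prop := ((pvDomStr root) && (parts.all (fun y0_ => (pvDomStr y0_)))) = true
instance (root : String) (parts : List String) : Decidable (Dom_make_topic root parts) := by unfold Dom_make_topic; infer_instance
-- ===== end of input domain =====

-- B builds the topic in one fused accumulator loop (separator flag + per-character escape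
-- emission) instead of A's staged replace-replace-replace-replace / join pipeline; same output.


-- ===== PORT A =====
def make_topic (root : String) (parts : List String) : String :=
  let topic := root
  let topic := if root != "" && !parts.isEmpty then topic ++ "/" else topic
  topic ++ PySem.Str.join "/" (parts.map (fun p =>
    if !(p == "+" || p == "#") then
      PySem.Str.replace (PySem.Str.replace (PySem.Str.replace
        (PySem.Str.replace p "%" "%25") "/" "%2F") "#" "%23") "+" "%2B"
    else p))

-- ===== PORT B =====
-- the per-character emission of B's inner elif chain
def pvEmit (c : Char) : String :=
  if c == '%' then "%25"
  else if c == '/' then "%2F"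
  else if c == '#' then "%23"
  else if c == '+' then "%2B"
  else String.ofList [c]

def make_topic_alt (root : String) (parts : List String) : String :=
  let buf : List String := root.toList.map (fun c => String.ofList [c])
  let st := parts.foldl (fun (st : List String × Bool) p =>
      let buf := if st.2 then st.1 ++ ["/"] else st.1
      let buf := if p == "+" || p == "#" then buf ++ [p]
                 else buf ++ p.toList.map pvEmit
      (buf, true)) (buf, root != "")
  PySem.Str.join "" st.1

-- ===== PRECONDITION & SPEC =====
def Spec_make_topic (root : String) (parts : List String) (out : String) : Prop := out = make_topic_alt root parts
instance (root : String) (parts : List String) (out : String) : Decidable (Spec_make_topic root parts out) := by unfold Spec_make_topic; infer_instance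

-- ===== CLAIM (what is proved, stated in full; the proofs are below) =====
def Claim_equal_make_topic : Prop := ∀ (root : String) (parts : List String), Dom_make_topic root parts → Spec_make_topic root parts (make_topic root parts)

-- ===== LEMMAS AND PROOFS =====

-- characters of a ''-join
def pvCharsJoin (l : List String) : List Char := (l.map String.toList).flatten

theorem charsJoin_append (a b : List String) :
    pvCharsJoin (a ++ b) = pvCharsJoin a ++ pvCharsJoin b := by
  simp [pvCharsJoin]

theorem charsJoin_cons (s : String) (l : List String) :
    pvCharsJoin (s :: l) = s.toList ++ pvCharsJoin l := by
  simp [pvCharsJoin]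

theorem charsJoin_nil : pvCharsJoin [] = [] := rfl

theorem flatten_intersperse_nil {α : Type} (l : List (List α)) :
    (List.intersperse ([] : List α) l).flatten = l.flatten := by
  induction l with
  | nil => simp
  | cons x xs ih =>
      cases xs with
      | nil => simp
      | cons y ys => simp_all [List.intersperse_cons₂]

theorem toList_join_nil (l : List String) :
    (PySem.Str.join "" l).toList = pvCharsJoin l := by
  simp [PySem.Str.toList_join, PySem.Chars.join, List.intercalate,
    flatten_intersperse_nil, pvCharsJoin]

-- the per-character escape both sides compute
def pvEsc (c : Char) : List Char :=
  if c == '%' then ['%', '2', '5']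
  else if c == '/' then ['%', '2', 'F']
  else if c == '#' then ['%', '2', '3']
  else if c == '+' then ['%', '2', 'B']
  else [c]

theorem pvEmit_toList (c : Char) : (pvEmit c).toList = pvEsc c := by
  unfold pvEmit pvEsc
  split_ifs <;> first | rfl | exact String.toList_ofList

-- single-character replace is a per-character expansion
theorem replace_go_single (o : Char) (new : List Char) :
    ∀ (cs acc : List Char) (fuel : Nat), cs.length ≤ fuel →
      PySem.Chars.replace.go [o] new fuel cs acc
        = acc.reverse ++ cs.flatMap (fun c => if c == o then new else [c]) := by
  intro cs
  induction cs with
  | nil =>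
      intro acc fuel _
      cases fuel <;> simp [PySem.Chars.replace.go]
  | cons c t ih =>
      intro acc fuel hf
      cases fuel with
      | zero => simp at hf
      | succ n =>
        simp only [List.length_cons, Nat.succ_le_succ_iff] at hf
        by_cases h : c = o
        · subst h
          have hpre : List.isPrefixOf [c] (c :: t) = true := by
            simp [List.isPrefixOf]
          simp only [PySem.Chars.replace.go, hpre, if_pos, List.length_cons,
            List.length_nil, List.drop_succ_cons, List.drop_zero]
          rw [ih _ n (by simpa using hf)]
          simp
        · have hpre : List.isPrefixOf [o] (c :: t) = false := by
            simp [List.isPrefixOf]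
            exact fun hh => h hh.symm
          simp only [PySem.Chars.replace.go, hpre]
          rw [ih _ n hf]
          simp [h]

theorem replace_single (o : Char) (new cs : List Char) :
    PySem.Chars.replace cs [o] new
      = cs.flatMap (fun c => if c == o then new else [c]) := by
  have := replace_go_single o new cs [] cs.length le_rfl
  simpa [PySem.Chars.replace] using this

-- A's four chained replaces collapse to one pvEsc pass
theorem chainA_eq (cs : List Char) :
    PySem.Chars.replace (PySem.Chars.replace (PySem.Chars.replace
      (PySem.Chars.replace cs ['%'] ['%','2','5']) ['/'] ['%','2','F'])
      ['#'] ['%','2','3']) ['+'] ['%','2','B'] = cs.flatMap pvEsc := by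
  simp only [replace_single, List.flatMap_assoc]
  apply List.flatMap_congr
  intro c _
  by_cases h1 : c = '%' <;> by_cases h2 : c = '/' <;> by_cases h3 : c = '#' <;>
    by_cases h4 : c = '+' <;> simp_all [pvEsc]

-- escaped characters of one part, as both sides produce them
def pvEscChars (p : String) : List Char :=
  if p == "+" || p == "#" then p.toList else p.toList.flatMap pvEsc

theorem escA_toList (p : String) :
    (if !(p == "+" || p == "#") then
      PySem.Str.replace (PySem.Str.replace (PySem.Str.replace
        (PySem.Str.replace p "%" "%25") "/" "%2F") "#" "%23") "+" "%2B"
     else p).toList = pvEscChars p := by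
  unfold pvEscChars
  by_cases h : (p == "+" || p == "#") = true
  · simp [h]
  · simp only [h, Bool.not_false, if_true, Bool.false_eq_true, if_false]
    simp only [PySem.Str.toList_replace]
    exact chainA_eq p.toList

theorem chunk_chars (p : String) :
    pvCharsJoin (p.toList.map pvEmit) = p.toList.flatMap pvEsc := by
  unfold pvCharsJoin
  rw [List.map_map]
  have : (String.toList ∘ pvEmit) = pvEsc := funext pvEmit_toList
  rw [this, ← List.flatMap_def]

-- what B's fold appends, character-wise
def pvG (sep : Bool) (parts : List String) : List Char :=
  match parts with
  | [] => []
  | p :: ps => (if sep then ['/'] else []) ++ pvEscChars p ++ pvG true ps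

theorem fold_chars (parts : List String) :
    ∀ (buf : List String) (sep : Bool),
      pvCharsJoin (parts.foldl (fun (st : List String × Bool) p =>
        let buf := if st.2 then st.1 ++ ["/"] else st.1
        let buf := if p == "+" || p == "#" then buf ++ [p]
                   else buf ++ p.toList.map pvEmit
        (buf, true)) (buf, sep)).1 = pvCharsJoin buf ++ pvG sep parts := by
  induction parts with
  | nil => intro buf sep; simp [pvG]
  | cons p ps ih =>
      intro buf sep
      simp only [List.foldl_cons]
      rw [ih]
      have hcons : pvG sep (p :: ps)
          = (if sep then ['/'] else []) ++ (pvEscChars p ++ pvG true ps) := by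
        simp [pvG]
      rw [hcons]
      by_cases hp : (p == "+" || p == "#") = true <;> cases sep <;>
        simp [hp, pvEscChars, charsJoin_append, charsJoin_cons, charsJoin_nil, chunk_chars]

theorem pvG_true (ps : List String) :
    pvG true ps = (if ps.isEmpty then [] else ['/']) ++
      List.intercalate ['/'] (ps.map pvEscChars) := by
  induction ps with
  | nil => simp [pvG, List.intercalate]
  | cons p t ih =>
      unfold pvG
      rw [ih]
      cases t with
      | nil => simp [List.intercalate]
      | cons q u => simp [List.intercalate, List.intersperse_cons₂]

theorem pvG_false (ps : List String) :
    pvG false ps = List.intercalate ['/'] (ps.map pvEscChars) := by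
  cases ps with
  | nil => simp [pvG, List.intercalate]
  | cons p t =>
      unfold pvG
      rw [pvG_true]
      cases t with
      | nil => simp [List.intercalate]
      | cons q u => simp [List.intercalate, List.intersperse_cons₂]

theorem charsJoin_singletons (cs : List Char) :
    pvCharsJoin (cs.map (fun c => String.ofList [c])) = cs := by
  unfold pvCharsJoin
  rw [List.map_map]
  induction cs with
  | nil => rfl
  | cons c t ih => simpa using ih

theorem make_topic_eq (root : String) (parts : List String) :
    make_topic root parts = make_topic_alt root parts := by
  unfold make_topic make_topic_alt
  apply String.toList_inj.mp
  rw [toList_join_nil, fold_chars, charsJoin_singletons]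
  have hj : (PySem.Str.join "/" (parts.map (fun p =>
      if !(p == "+" || p == "#") then
        PySem.Str.replace (PySem.Str.replace (PySem.Str.replace
          (PySem.Str.replace p "%" "%25") "/" "%2F") "#" "%23") "+" "%2B"
      else p))).toList = List.intercalate ['/'] (parts.map pvEscChars) := by
    rw [PySem.Str.toList_join, List.map_map]
    have : (String.toList ∘ fun p =>
        if !(p == "+" || p == "#") then
          PySem.Str.replace (PySem.Str.replace (PySem.Str.replace
            (PySem.Str.replace p "%" "%25") "/" "%2F") "#" "%23") "+" "%2B"
        else p) = pvEscChars := funext escA_toList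
    rw [this]
    rfl
  by_cases hr : root = ""
  · subst hr
    simp only [bne_self_eq_false, Bool.false_and, Bool.false_eq_true, if_false]
    rw [String.toList_append, hj, pvG_false]
  · have hr' : (root != "") = true := by simpa using hr
    rw [hr', pvG_true]
    cases hps : parts.isEmpty with
    | true =>
        have : parts = [] := List.isEmpty_iff.mp hps
        subst this
        simp [List.intercalate, PySem.Str.join, PySem.Chars.join]
    | false =>
        simp only [Bool.not_false, Bool.and_self, if_pos]
        rw [String.toList_append, String.toList_append, hj]
        simp

-- ===== VERDICT (by name: the statement is the Claim_ definition above) =====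
theorem make_topic_spec : Claim_equal_make_topic := by
  intro root parts _
  exact make_topic_eq root parts
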